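-- pv_equiv track=rewrite | github.com/thunlp/KnowledgeablePromptTuning | src/datasets.py | delete_common_words
-- ===== SOURCE A (Python) =====
-- def delete_common_words(d):
--     word_count = {}
--     for key in d:
--         for w in d[key]:
--             if w not in word_count:
--                 word_count[w]=1
--             else:
--                 word_count[w]+=1
--     for w in word_count:
--         if word_count[w]>=2:
--             for key in d:
--                 if w in d[key][1:]:
--                     findidx = d[key][1:].index(w)
--                     d[key].pop(findidx+1)
--     return d
-- ===== SOURCE B (Python) =====
-- def delete_common_words(d):
--     counts = {}
--     for words in d.values():
--         for w in words:
--             counts[w] = counts.get(w, 0) + 1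
--     common = {w for w, c in counts.items() if c >= 2}
--     for key in d:
--         words = d[key]
--         removed = set()
--         new = words[:1]
--         for w in words[1:]:
--             if w in common and w not in removed:
--                 removed.add(w)
--             else:
--                 new.append(w)
--         d[key][:] = new
--     return d
-- ===== Notes on version B (the rewrite author's own statement) =====
-- stated objective: faster
-- what changed: A rescans every list once per common word with .index on the tail and .pop; B counts all words once, forms the set of words with total count >= 2, and then rewrites each list in a single left-to-right pass over its tail using a per-list 'removed' set.
import Mathlib
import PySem

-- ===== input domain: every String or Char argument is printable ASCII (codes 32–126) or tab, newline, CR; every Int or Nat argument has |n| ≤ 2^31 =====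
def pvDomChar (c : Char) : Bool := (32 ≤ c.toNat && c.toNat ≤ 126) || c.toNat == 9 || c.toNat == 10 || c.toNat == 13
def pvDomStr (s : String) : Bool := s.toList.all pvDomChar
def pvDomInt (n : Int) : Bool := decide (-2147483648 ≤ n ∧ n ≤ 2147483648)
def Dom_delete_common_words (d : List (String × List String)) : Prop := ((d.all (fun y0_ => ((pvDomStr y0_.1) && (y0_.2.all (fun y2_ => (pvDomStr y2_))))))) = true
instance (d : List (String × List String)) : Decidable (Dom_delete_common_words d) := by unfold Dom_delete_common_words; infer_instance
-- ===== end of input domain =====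

-- B replaces A's per-common-word `.index`/`.pop` rescan of every list by one linear left-to-right
-- pass per list with a per-list 'removed' set. Both Pythons mutate the dict's value lists in
-- place in the same way; the equivalence proved here is about the return value.

-- ===== PORT A =====
-- per-key body of A's inner loop: if w in d[key][1:]: findidx = d[key][1:].index(w); d[key].pop(findidx+1)
def pvAUpd (w : String) (ws : List String) : List String :=
  let tl := PySem.List.slice ws (some 1) none
  if w ∈ tl then
    match PySem.List.index? tl w with
    | some findidx =>
      match PySem.List.pop? ws ((findidx : Int) + 1) with
      | some r => r.2
      | none => ws
    | none => ws
  else ws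

def delete_common_words (d : List (String × List String)) : List (String × List String) :=
  let word_count : PySem.Dict String Int :=
    d.foldl (fun wc kv =>
      kv.2.foldl (fun wc w =>
        if wc.contains w = false then wc.insert w 1 else wc.modify w 0 (· + 1)) wc)
      PySem.Dict.empty
  word_count.keys.foldl (fun d w =>
    if word_count.getD w 0 ≥ 2 then d.map (fun kv => (kv.1, pvAUpd w kv.2)) else d) d

-- ===== PORT B =====
-- B's inner loop: walk the tail once, dropping the first not-yet-removed occurrence of each common word
def pvScanTail (common : PySem.Set String) (removed : PySem.Set String)
    (new : List String) : List String → List String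
  | [] => new
  | w :: rest =>
    if common.contains w && !removed.contains w then
      pvScanTail common (PySem.Set.add removed w) new rest
    else
      pvScanTail common removed (new ++ [w]) rest

def delete_common_words_alt (d : List (String × List String)) : List (String × List String) :=
  let counts : PySem.Dict String Int :=
    d.foldl (fun c kv => kv.2.foldl (fun c w => c.insert w (c.getD w 0 + 1)) c)
      PySem.Dict.empty
  let common : PySem.Set String :=
    PySem.Set.ofList ((counts.items.filter (fun p => p.2 ≥ 2)).map (·.1))
  d.map (fun kv =>
    (kv.1, pvScanTail common PySem.Set.empty
            (PySem.List.slice kv.2 none (some 1))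
            (PySem.List.slice kv.2 (some 1) none)))

-- ===== PRECONDITION & SPEC =====
def Spec_delete_common_words (d : List (String × List String)) (out : List (String × List String)) : Prop := out = delete_common_words_alt d
instance (d : List (String × List String)) (out : List (String × List String)) : Decidable (Spec_delete_common_words d out) := by unfold Spec_delete_common_words; infer_instance

-- ===== CLAIM (what is proved, stated in full; the proofs are below) =====
def Claim_equal_delete_common_words : Prop := ∀ (d : List (String × List String)), Dom_delete_common_words d → Spec_delete_common_words d (delete_common_words d)

-- ===== LEMMAS AND PROOFS =====

-- removal of the first occurrence of each word of W (a duplicate-free word set) from a list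
def pvRmSet (W : List String) : List String → List String
  | [] => []
  | x :: t => if x ∈ W then pvRmSet (W.erase x) t else x :: pvRmSet W t

theorem pvRmSet_nil (t : List String) : pvRmSet [] t = t := by
  induction t with
  | nil => rfl
  | cons x t ih => simp [pvRmSet, ih]

theorem pvRmSet_congr (S S' t : List String) (hS : S.Nodup) (hS' : S'.Nodup)
    (h : ∀ x, x ∈ S ↔ x ∈ S') : pvRmSet S t = pvRmSet S' t := by
  induction t generalizing S S' with
  | nil => rfl
  | cons x t ih =>
    simp only [pvRmSet]
    by_cases hx : x ∈ S
    · rw [if_pos hx, if_pos ((h x).1 hx)]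
      exact ih _ _ (hS.erase x) (hS'.erase x)
        (fun y => by rw [List.Nodup.mem_erase_iff hS, List.Nodup.mem_erase_iff hS', h y])
    · rw [if_neg hx, if_neg (fun hx' => hx ((h x).2 hx'))]
      rw [ih _ _ hS hS' h]

theorem pvRmSet_erase (S t : List String) (w : String) (hw : w ∉ S) :
    pvRmSet S (t.erase w) = pvRmSet (w :: S) t := by
  induction t generalizing S with
  | nil => simp [pvRmSet]
  | cons x t ih =>
    by_cases hxw : x = w
    · subst hxw
      rw [List.erase_cons_head]
      simp only [pvRmSet, List.mem_cons, true_or, if_true, List.erase_cons_head]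
    · rw [List.erase_cons_tail (by simpa using hxw)]
      simp only [pvRmSet, List.mem_cons, hxw, false_or]
      by_cases hxS : x ∈ S
      · rw [if_pos hxS, if_pos hxS]
        rw [List.erase_cons_tail (by simpa using fun h => hxw h.symm)]
        exact ih (S.erase x) (fun h => hw (List.mem_of_mem_erase h))
      · rw [if_neg hxS, if_neg hxS, ih S hw]

theorem pvFoldl_erase_eq_rmSet (W t : List String) (hW : W.Nodup) :
    W.foldl (fun t w => t.erase w) t = pvRmSet W t := by
  induction W generalizing t with
  | nil => simpa using (pvRmSet_nil t).symm
  | cons w W ih =>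
    simp only [List.foldl_cons]
    rw [ih _ (List.nodup_cons.1 hW).2, pvRmSet_erase W t w (List.nodup_cons.1 hW).1]

-- erasing the index of the first occurrence is List.erase
theorem pvEraseIdx_append (w : String) (pre suf : List String) :
    (pre ++ w :: suf).eraseIdx pre.length = pre ++ suf := by
  induction pre with
  | nil => simp
  | cons p pre ih => simp [List.eraseIdx_cons_succ, ih]

theorem pvErase_append (w : String) (pre suf : List String) (hnp : w ∉ pre) :
    (pre ++ w :: suf).erase w = pre ++ suf := by
  induction pre with
  | nil => simp
  | cons p pre ih =>
    simp only [List.mem_cons, not_or] at hnp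
    rw [List.cons_append,
      List.erase_cons_tail (by simp; exact fun h => hnp.1 h.symm),
      ih hnp.2, List.cons_append]

theorem pvEraseIdx_index (t : List String) (w : String) (i : Nat)
    (hi : PySem.List.index? t w = some i) : t.eraseIdx i = t.erase w := by
  rw [PySem.List.index?_eq_some_iff] at hi
  rcases hi with ⟨pre, suf, rfl, rfl, hnp⟩
  rw [pvEraseIdx_append, pvErase_append w pre suf hnp]

-- A's per-key update is: keep the head, erase the first occurrence of w from the tail
theorem pvAUpd_eq (w : String) (ws : List String) :
    pvAUpd w ws = match ws with
      | [] => []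
      | x :: t => x :: t.erase w := by
  match ws with
  | [] => rfl
  | x :: t =>
    simp only [pvAUpd, PySem.List.slice_from_one, List.tail_cons]
    by_cases hw : w ∈ t
    · rw [if_pos hw]
      rcases Option.isSome_iff_exists.1 ((PySem.List.index?_isSome_iff t w).2 hw) with ⟨i, hi⟩
      rw [hi]
      show (match PySem.List.pop? (x :: t) ((i : Int) + 1) with
            | some r => r.2
            | none => x :: t) = x :: t.erase w
      have hlt : i < t.length := by
        rcases PySem.List.getElem_of_index?_eq_some hi with ⟨h, _⟩
        exact h
      rw [show ((i : Int) + 1) = ((i + 1 : Nat) : Int) by push_cast; ring,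
        PySem.List.pop?_natCast (x :: t) (i + 1) (by simpa using hlt)]
      show (x :: t).eraseIdx (i + 1) = x :: t.erase w
      rw [List.eraseIdx_cons_succ, pvEraseIdx_index t w i hi]
    · rw [if_neg hw, (List.erase_of_not_mem hw)]

-- folding A's per-key update over a word list keeps the head and folds erase over the tail
theorem pvFoldl_aUpd (W : List String) (x : String) (t : List String) :
    W.foldl (fun ws w => pvAUpd w ws) (x :: t) = x :: W.foldl (fun t w => t.erase w) t := by
  induction W generalizing t with
  | nil => rfl
  | cons w W ih =>
    simp only [List.foldl_cons]
    rw [show pvAUpd w (x :: t) = x :: t.erase w from pvAUpd_eq w (x :: t)]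
    exact ih (t.erase w)

theorem pvFoldl_aUpd_nil (W : List String) :
    W.foldl (fun ws w => pvAUpd w ws) [] = [] := by
  induction W with
  | nil => rfl
  | cons w W ih =>
    simp only [List.foldl_cons]
    rw [show pvAUpd w [] = [] from pvAUpd_eq w []]
    exact ih

-- a fold of maps is a map of folds
theorem pvFoldl_map_comm {α β : Type} (W : List β) (g : β → α → α) (d : List α) :
    W.foldl (fun d w => d.map (g w)) d = d.map (fun x => W.foldl (fun x w => g w x) x) := by
  induction W generalizing d with
  | nil => simp
  | cons w W ih =>
    simp only [List.foldl_cons, ih, List.map_map]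
    rfl

-- a fold acting only on the second component
theorem pvFoldl_snd {α β γ : Type} (W : List γ) (h : γ → β → β) (p : α × β) :
    W.foldl (fun kv w => (kv.1, h w kv.2)) p = (p.1, W.foldl (fun b w => h w b) p.2) := by
  induction W generalizing p with
  | nil => rfl
  | cons w W ih => simp only [List.foldl_cons]; exact ih (p.1, h w p.2)

-- an if-guarded fold is a fold over the filtered list
theorem pvFoldl_if_filter {α β : Type} (l : List β) (p : β → Prop) [DecidablePred p]
    (f : α → β → α) (a : α) :
    l.foldl (fun a w => if p w then f a w else a) a
      = (l.filter (fun w => decide (p w))).foldl f a := by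
  induction l generalizing a with
  | nil => rfl
  | cons w l ih =>
    by_cases hp : p w <;> simp [hp, ih]

-- B's scan computes pvRmSet of any duplicate-free list with the right membership
theorem pvScanTail_eq (common removed new : List String) (rest : List String)
    (S : List String) (hS : S.Nodup)
    (hmem : ∀ x, x ∈ S ↔ (PySem.Set.contains common x = true ∧ ¬ PySem.Set.contains removed x = true)) :
    pvScanTail common removed new rest = new ++ pvRmSet S rest := by
  induction rest generalizing removed new S with
  | nil => simp [pvScanTail, pvRmSet]
  | cons w rest ih =>
    simp only [pvScanTail, pvRmSet]
    by_cases hc : (PySem.Set.contains common w && !PySem.Set.contains removed w) = true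
    · rw [if_pos hc]
      simp only [Bool.and_eq_true, Bool.not_eq_true'] at hc
      have hwS : w ∈ S := (hmem w).2 ⟨hc.1, fun h => absurd (h ▸ hc.2) (by decide)⟩
      rw [if_pos hwS]
      exact ih (PySem.Set.add removed w) new (S.erase w) (hS.erase w)
        (fun x => by
          rw [List.Nodup.mem_erase_iff hS, hmem x]
          constructor
          · rintro ⟨hx, h1, h2⟩
            refine ⟨h1, fun hadd => ?_⟩
            rw [PySem.Set.contains_iff] at hadd
            rcases (PySem.Set.mem_add removed w x).1 hadd with h | h
            · exact h2 ((PySem.Set.contains_iff removed x).2 h)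
            · exact hx h
          · rintro ⟨h1, h2⟩
            refine ⟨fun hxw => ?_, h1, fun hr => ?_⟩
            · exact h2 ((PySem.Set.contains_iff _ x).2
                ((PySem.Set.mem_add removed w x).2 (Or.inr hxw)))
            · exact h2 ((PySem.Set.contains_iff _ x).2
                ((PySem.Set.mem_add removed w x).2 (Or.inl ((PySem.Set.contains_iff removed x).1 hr)))))
    · rw [if_neg hc]
      have hwS : w ∉ S := by
        intro hw
        rcases (hmem w).1 hw with ⟨h1, h2⟩
        have hb : PySem.Set.contains removed w = false := Bool.eq_false_iff.mpr h2
        exact hc (by rw [h1, hb]; rfl)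
      rw [if_neg hwS, ih removed (new ++ [w]) S hS hmem, List.append_assoc, List.singleton_append]

-- counting keeps the key list duplicate-free
theorem pvNodupKeysCount (d : List (String × List String)) (c : PySem.Dict String Int)
    (h : c.keys.Nodup) :
    (d.foldl (fun c kv => kv.2.foldl (fun c w => c.insert w (c.getD w 0 + 1)) c) c).keys.Nodup := by
  induction d generalizing c with
  | nil => exact h
  | cons kv d ih =>
    exact ih _ (PySem.Dict.nodup_keys_foldl_insert kv.2 (fun c w => c.getD w 0 + 1) c h)

-- A's second phase equals B's single map, for any counting dict with duplicate-free keys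
theorem pvPhase2 (C : PySem.Dict String Int) (hnd : C.keys.Nodup)
    (d : List (String × List String)) :
    C.keys.foldl (fun d w =>
        if C.getD w 0 ≥ 2 then d.map (fun kv => (kv.1, pvAUpd w kv.2)) else d) d
      = d.map (fun kv =>
          (kv.1, pvScanTail (PySem.Set.ofList ((C.items.filter (fun p => p.2 ≥ 2)).map (·.1)))
                  PySem.Set.empty
                  (PySem.List.slice kv.2 none (some 1))
                  (PySem.List.slice kv.2 (some 1) none))) := by
  set W : List String := C.keys.filter (fun w => decide (C.getD w 0 ≥ 2)) with hW
  set L : List String := (C.items.filter (fun p => p.2 ≥ 2)).map (·.1) with hL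
  have hWnd : W.Nodup := hnd.filter _
  have hLW : L = W := by
    rw [hL, hW, PySem.Dict.items_eq_map_keys C hnd 0, List.filter_map, List.map_map]
    simp [Function.comp_def]
  have hcommon : ∀ x, x ∈ PySem.Set.ofList L ↔ x ∈ W := by
    intro x; rw [PySem.Set.mem_ofList, hLW]
  have hmem : ∀ x, x ∈ PySem.Set.ofList L ↔
      (PySem.Set.contains (PySem.Set.ofList L) x = true ∧
       ¬ PySem.Set.contains (PySem.Set.empty : PySem.Set String) x = true) := by
    intro x
    rw [PySem.Set.contains_iff]
    simp [PySem.Set.empty, PySem.Set.contains]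
  rw [pvFoldl_if_filter C.keys (fun w => C.getD w 0 ≥ 2), ← hW, pvFoldl_map_comm]
  apply List.map_congr_left
  intro kv _
  rw [pvFoldl_snd]
  cases hws : kv.2 with
  | nil =>
    rw [pvFoldl_aUpd_nil]
    simp [pysem, pvScanTail]
  | cons x t =>
    rw [pvFoldl_aUpd, pvFoldl_erase_eq_rmSet W t hWnd]
    have hs1 : PySem.List.slice (x :: t) none (some 1) = [x] := by simp [pysem]
    have hs2 : PySem.List.slice (x :: t) (some 1) none = t := by
      rw [PySem.List.slice_from_one]; rfl
    rw [hs1, hs2,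
      pvScanTail_eq (PySem.Set.ofList L) PySem.Set.empty [x] t (PySem.Set.ofList L)
        (PySem.Set.nodup_ofList L) hmem,
      List.singleton_append,
      pvRmSet_congr (PySem.Set.ofList L) W t (PySem.Set.nodup_ofList L) hWnd hcommon]

-- ===== VERDICT (by name: the statement is the Claim_ definition above) =====
theorem delete_common_words_spec : Claim_equal_delete_common_words := by
  intro d _
  unfold Spec_delete_common_words
  have hstep : (fun (wc : PySem.Dict String Int) (w : String) =>
      if wc.contains w = false then wc.insert w 1 else wc.modify w 0 (· + 1))
      = (fun (c : PySem.Dict String Int) (w : String) => c.insert w (c.getD w 0 + 1)) := by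
    funext wc w
    by_cases h : wc.contains w = true
    · rw [if_neg (by simp [h])]
      simp only [PySem.Dict.modify, PySem.Dict.getD_eq_get?_getD]
    · have hf : wc.contains w = false := Bool.eq_false_iff.mpr h
      rw [if_pos hf, PySem.Dict.getD_of_not_contains wc 0 hf]
      norm_num
  simp only [delete_common_words, delete_common_words_alt, hstep]
  exact pvPhase2 _ (pvNodupKeysCount d PySem.Dict.empty PySem.Dict.nodup_keys_empty) d
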